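-- pv_equiv track=rewrite | github.com/KhushiPunia06/compilerdesign | lex program.py | get_statements
-- ===== SOURCE A (Python) =====
-- TOKEN_SEPARATOR = "SEPARATOR"
--
-- def get_statements(tokens):
--     statements = []
--     current_statement = []
--     for token in tokens:
--         current_statement.append(token)
--         if token[0] == TOKEN_SEPARATOR and token[1] == ';':
--             statements.append(current_statement)
--             current_statement = []
--     return statements
-- ===== SOURCE B (Python) =====
-- TOKEN_SEPARATOR = "SEPARATOR"
--
-- def get_statements(tokens):
--     # Pass 1: collect the indices of all statement-terminating separators.
--     cuts = [i for i, token in enumerate(tokens)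
--             if token[0] == TOKEN_SEPARATOR and token[1] == ';']
--     # Pass 2: slice the token list at those boundaries (separator included);
--     # anything after the last separator is not emitted.
--     statements = []
--     start = 0
--     for cut in cuts:
--         statements.append(tokens[start:cut + 1])
--         start = cut + 1
--     return statements
-- ===== Notes on version B (the rewrite author's own statement) =====
-- stated objective: alternative
-- what changed: Replaces A's single accumulate-and-flush loop with a boundary-index decomposition: one pass collects the indices of ';' separator tokens, then the result is built by slicing tokens[start:cut+1] at each collected cut point.
import Mathlib
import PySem

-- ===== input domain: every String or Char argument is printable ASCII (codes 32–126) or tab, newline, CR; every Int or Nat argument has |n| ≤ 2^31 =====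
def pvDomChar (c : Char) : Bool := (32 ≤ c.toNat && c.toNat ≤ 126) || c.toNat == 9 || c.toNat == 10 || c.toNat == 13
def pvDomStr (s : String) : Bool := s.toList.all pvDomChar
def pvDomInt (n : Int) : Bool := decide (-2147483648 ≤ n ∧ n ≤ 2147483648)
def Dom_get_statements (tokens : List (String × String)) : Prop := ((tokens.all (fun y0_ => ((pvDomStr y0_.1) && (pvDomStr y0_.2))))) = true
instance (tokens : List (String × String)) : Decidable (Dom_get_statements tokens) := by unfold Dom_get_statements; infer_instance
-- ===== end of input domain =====

-- B replaces A's accumulate-and-flush loop by a boundary-index decomposition (collect separator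
-- indices, then slice at them); same O(n) cost, alternative structure.

-- ===== PORT A =====
def get_statements (tokens : List (String × String)) : List (List (String × String)) :=
  (tokens.foldl
    (fun (st : List (List (String × String)) × List (String × String)) token =>
      let current := st.2 ++ [token]
      if token.1 == "SEPARATOR" && token.2 == ";" then (st.1 ++ [current], [])
      else (st.1, current))
    ([], [])).1

-- ===== PORT B =====
def get_statements_alt (tokens : List (String × String)) : List (List (String × String)) :=
  let cuts : List Int :=
    ((PySem.List.enumerate tokens 0).filter
      (fun it => it.2.1 == "SEPARATOR" && it.2.2 == ";")).map (·.1)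
  (cuts.foldl
    (fun (st : List (List (String × String)) × Int) cut =>
      (st.1 ++ [PySem.List.slice tokens (some st.2) (some (cut + 1))], cut + 1))
    ([], 0)).1

-- ===== PRECONDITION & SPEC =====
def Spec_get_statements (tokens : List (String × String)) (out : List (List (String × String))) : Prop := out = get_statements_alt tokens
instance (tokens : List (String × String)) (out : List (List (String × String))) : Decidable (Spec_get_statements tokens out) := by unfold Spec_get_statements; infer_instance

-- ===== CLAIM (what is proved, stated in full; the proofs are below) =====
def Claim_equal_get_statements : Prop := ∀ (tokens : List (String × String)), Dom_get_statements tokens → Spec_get_statements tokens (get_statements tokens)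

-- ===== LEMMAS AND PROOFS =====

/-- Reference splitting: segments ending at each separator token, seeded with `cur`. -/
def pvChunks : List (String × String) → List (String × String) → List (List (String × String))
  | _, [] => []
  | cur, t :: ts =>
    if t.1 == "SEPARATOR" && t.2 == ";" then (cur ++ [t]) :: pvChunks [] ts
    else pvChunks (cur ++ [t]) ts

/-- Relative positions of the separator tokens. -/
def pvRC : List (String × String) → List Nat
  | [] => []
  | t :: ts =>
    if t.1 == "SEPARATOR" && t.2 == ";" then 0 :: (pvRC ts).map (· + 1)
    else (pvRC ts).map (· + 1)

lemma pvA_eq (ts : List (String × String)) :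
    ∀ (stmts : List (List (String × String))) (cur : List (String × String)),
    (ts.foldl
      (fun (st : List (List (String × String)) × List (String × String)) token =>
        let current := st.2 ++ [token]
        if token.1 == "SEPARATOR" && token.2 == ";" then (st.1 ++ [current], [])
        else (st.1, current))
      (stmts, cur)).1 = stmts ++ pvChunks cur ts := by
  induction ts with
  | nil => intro stmts cur; simp [pvChunks]
  | cons t ts ih =>
    intro stmts cur
    by_cases h : (t.1 == "SEPARATOR" && t.2 == ";") = true
    · simp only [List.foldl_cons, pvChunks, h, if_true]
      rw [ih]; simp
    · simp only [List.foldl_cons, pvChunks, h, Bool.false_eq_true, if_false]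
      rw [ih]

lemma pvCuts_eq (ts : List (String × String)) :
    ∀ (s : Int),
    ((PySem.List.enumerate ts s).filter (fun it => it.2.1 == "SEPARATOR" && it.2.2 == ";")).map (·.1)
      = List.map (fun i : Nat => s + (i : Int)) (pvRC ts) := by
  induction ts with
  | nil => intro s; simp [PySem.List.enumerate_nil, pvRC]
  | cons t ts ih =>
    intro s
    rw [PySem.List.enumerate_cons]
    by_cases h : (t.1 == "SEPARATOR" && t.2 == ";") = true
    · simp only [List.filter_cons, pvRC, h, if_true, List.map_cons, List.map_map]
      congr 1
      · ring
      · rw [ih (s + 1)]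
        apply List.map_congr_left
        intro i _
        simp only [Function.comp_apply]
        push_cast; ring
    · simp only [List.filter_cons, pvRC, h, Bool.false_eq_true, if_false, List.map_map]
      rw [ih (s + 1)]
      apply List.map_congr_left
      intro i _
      simp only [Function.comp_apply]
      push_cast; ring

lemma pvB_loop (ts : List (String × String)) :
    ∀ (cur tokens0 : List (String × String)) (start : Nat)
      (res : List (List (String × String))),
    tokens0.drop start = cur ++ ts →
    ((List.map (fun i : Nat => ((start + cur.length + i : Nat) : Int)) (pvRC ts)).foldl
      (fun (st : List (List (String × String)) × Int) cut =>
        (st.1 ++ [PySem.List.slice tokens0 (some st.2) (some (cut + 1))], cut + 1))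
      (res, (start : Int))).1 = res ++ pvChunks cur ts := by
  induction ts with
  | nil => intro cur tokens0 start res _; simp [pvRC, pvChunks]
  | cons t ts ih =>
    intro cur tokens0 start res hdrop
    by_cases h : (t.1 == "SEPARATOR" && t.2 == ";") = true
    · simp only [pvRC, pvChunks, h, if_true, List.map_cons, List.map_map, List.foldl_cons]
      have hsl : PySem.List.slice tokens0 (some (start : Int))
          (some (((start + cur.length + 0 : Nat) : Int) + 1)) = cur ++ [t] := by
        have hb : (((start + cur.length + 0 : Nat) : Int) + 1)
            = ((start + (cur.length + 1) : Nat) : Int) := by push_cast; ring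
        rw [hb, PySem.List.slice_natCast, hdrop]
        have hlen : start + (cur.length + 1) - start = cur.length + 1 := by omega
        rw [hlen]
        simp [List.take_append]
      rw [hsl]
      have hstep : (((start + cur.length + 0 : Nat) : Int) + 1)
          = ((start + cur.length + 1 : Nat) : Int) := by push_cast; ring
      rw [hstep]
      have hdrop' : tokens0.drop (start + cur.length + 1) = ([] : List (String × String)) ++ ts := by
        have hd : tokens0.drop (start + cur.length + 1)
            = (tokens0.drop start).drop (cur.length + 1) := by
          rw [List.drop_drop]
          rfl
        rw [hd, hdrop]
        simp [List.drop_append]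
      have hmap : List.map ((fun i : Nat => ((start + cur.length + i : Nat) : Int)) ∘ (· + 1)) (pvRC ts)
          = List.map (fun i : Nat => ((start + cur.length + 1 + ([] : List (String × String)).length + i : Nat) : Int)) (pvRC ts) := by
        apply List.map_congr_left; intro i _
        simp only [Function.comp_apply, List.length_nil]
        push_cast; ring
      rw [hmap]
      rw [ih [] tokens0 (start + cur.length + 1) (res ++ [cur ++ [t]]) hdrop']
      simp
    · simp only [pvRC, pvChunks, h, Bool.false_eq_true, if_false, List.map_map]
      have hdrop' : tokens0.drop start = (cur ++ [t]) ++ ts := by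
        rw [hdrop]; simp
      have hmap : List.map ((fun i : Nat => ((start + cur.length + i : Nat) : Int)) ∘ (· + 1)) (pvRC ts)
          = List.map (fun i : Nat => ((start + (cur ++ [t]).length + i : Nat) : Int)) (pvRC ts) := by
        apply List.map_congr_left; intro i _
        simp only [Function.comp_apply, List.length_append, List.length_cons, List.length_nil]
        push_cast; ring
      rw [hmap]
      exact ih (cur ++ [t]) tokens0 start res hdrop'

-- ===== VERDICT (by name: the statement is the Claim_ definition above) =====
theorem get_statements_spec : Claim_equal_get_statements := by
  intro tokens _
  unfold Spec_get_statements
  have hA : get_statements tokens = pvChunks [] tokens := by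
    unfold get_statements
    rw [pvA_eq tokens [] []]
    simp
  have hB : get_statements_alt tokens = pvChunks [] tokens := by
    show ((((PySem.List.enumerate tokens 0).filter
        (fun it => it.2.1 == "SEPARATOR" && it.2.2 == ";")).map (·.1)).foldl
      (fun (st : List (List (String × String)) × Int) cut =>
        (st.1 ++ [PySem.List.slice tokens (some st.2) (some (cut + 1))], cut + 1))
      ([], 0)).1 = pvChunks [] tokens
    rw [pvCuts_eq tokens 0]
    have hmap : List.map (fun i : Nat => (0 : Int) + (i : Int)) (pvRC tokens)
        = List.map (fun i : Nat => ((0 + ([] : List (String × String)).length + i : Nat) : Int)) (pvRC tokens) := by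
      apply List.map_congr_left; intro i _; simp
    rw [hmap]
    have := pvB_loop tokens [] tokens 0 [] (by simp)
    simpa using this
  rw [hA, hB]
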